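-- pv_equiv track=rewrite | github.com/vcm2114/Project2A | concepts.py | common_objects
-- ===== SOURCE A (Python) =====
-- def common_objects(M, attributs):
--
--     '''
--     Input: - M: context matrix
--            - attributs: a set of attributes
--     Output: set of common objects
--     '''
--
--     nattributes = len(attributs)
--     nobjects = len(M)
--     obj = range(nobjects)
--     res = [1]*nobjects
--
--     for i in obj:
--         j = 0
--         while (j < nattributes) and (res[i]==1):
--             res[i] = (res[i] and M[i][attributs[j]])
--             j += 1
--
--     return [e for e in obj if (res[e]==1)]
-- ===== SOURCE B (Python) =====
-- def common_objects(M, attributs):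
--     candidates = list(range(len(M)))
--     for k in range(len(attributs)):
--         if not candidates:
--             break
--         a = attributs[k]
--         candidates = [i for i in candidates if M[i][a] == 1]
--     return candidates
-- ===== Notes on version B (the rewrite author's own statement) =====
-- stated objective: alternative
-- what changed: Transposed the iteration: instead of a per-object while-loop over attributes with a res flag array, B keeps a shrinking candidate list of object indices and filters it once per attribute (intersection of extents), breaking when it empties.
import Mathlib
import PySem

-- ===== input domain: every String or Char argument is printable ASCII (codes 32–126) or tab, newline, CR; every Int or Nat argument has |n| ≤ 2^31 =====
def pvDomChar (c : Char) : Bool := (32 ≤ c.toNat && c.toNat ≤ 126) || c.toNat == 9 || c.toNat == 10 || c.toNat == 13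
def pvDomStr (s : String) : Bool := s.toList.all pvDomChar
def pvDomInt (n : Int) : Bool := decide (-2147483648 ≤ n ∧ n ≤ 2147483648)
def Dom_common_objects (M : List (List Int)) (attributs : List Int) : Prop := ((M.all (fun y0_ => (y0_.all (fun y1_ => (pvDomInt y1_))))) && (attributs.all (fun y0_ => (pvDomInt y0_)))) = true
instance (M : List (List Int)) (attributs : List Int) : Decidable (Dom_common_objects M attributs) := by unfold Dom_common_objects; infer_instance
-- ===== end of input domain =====

-- B replaces A's per-object while-loop by attribute-wise filtering of a shrinking candidate set; same cost, different decomposition.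

-- ===== PORT A =====
-- Python's `res[i] and M[i][attributs[j]]` on ints: 0 is falsy, anything else returns the right operand.
def pvPyAnd (a b : Int) : Int := if a = 0 then a else b

-- the inner `while (j < nattributes) and (res[i]==1)` loop, state r = res[i], recursing over attributs
def pvRowA (row : List Int) : Int → List Int → Int
  | r, [] => r
  | r, a :: rest =>
      if r = 1 then pvRowA row (pvPyAnd r ((PySem.List.pyGet? row a).getD 0)) rest
      else r

def common_objects (M : List (List Int)) (attributs : List Int) : List Int :=
  let nobjects := M.length
  let obj : List Int := (List.range nobjects).map (fun k => Int.ofNat k)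
  let res : List Int := obj.map (fun i => pvRowA ((PySem.List.pyGet? M i).getD []) 1 attributs)
  obj.filter (fun e => (PySem.List.pyGet? res e).getD 0 == 1)

-- ===== PORT B =====
def pvVal (M : List (List Int)) (i a : Int) : Int :=
  (PySem.List.pyGet? ((PySem.List.pyGet? M i).getD []) a).getD 0

-- the `for k in range(len(attributs))` loop over the candidate list, with the empty break
def pvBLoop (M : List (List Int)) : List Int → List Int → List Int
  | cand, [] => cand
  | cand, a :: rest =>
      if cand = [] then cand
      else pvBLoop M (cand.filter (fun i => pvVal M i a == 1)) rest

def common_objects_alt (M : List (List Int)) (attributs : List Int) : List Int :=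
  pvBLoop M ((List.range M.length).map (fun k => Int.ofNat k)) attributs

-- ===== PRECONDITION & SPEC =====
-- Pre_ excludes exactly the inputs where A raises IndexError: some row has an attribute index
-- out of range at a position A actually reaches (i.e. all earlier attributes score 1 on that row).
def Pre_common_objects (M : List (List Int)) (attributs : List Int) : Prop :=
  ∀ row ∈ M, ∀ j < attributs.length,
    (∀ i < j, (PySem.List.pyGet? row (attributs.getD i 0)).getD 0 = 1) →
    PySem.Raise.InRange row.length (attributs.getD j 0)

instance (M : List (List Int)) (attributs : List Int) : Decidable (Pre_common_objects M attributs) := by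
  unfold Pre_common_objects; infer_instance

def pvWitness_common_objects : List (List Int) × List Int := ([[1, 0], [1, 1]], [0])

def Spec_common_objects (M : List (List Int)) (attributs : List Int) (out : List Int) : Prop := out = common_objects_alt M attributs
instance (M : List (List Int)) (attributs : List Int) (out : List Int) : Decidable (Spec_common_objects M attributs out) := by unfold Spec_common_objects; infer_instance

-- ===== CLAIM (what is proved, stated in full; the proofs are below) =====
def Claim_equal_common_objects : Prop := ∀ (M : List (List Int)) (attributs : List Int), Dom_common_objects M attributs → Pre_common_objects M attributs → Spec_common_objects M attributs (common_objects M attributs)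

-- ===== LEMMAS AND PROOFS =====

theorem pvRowA_ne_one (row : List Int) (r : Int) (attrs : List Int) (h : r ≠ 1) :
    pvRowA row r attrs = r := by
  cases attrs <;> simp [pvRowA, h]

theorem pvRowA_one_iff (M : List (List Int)) (i : Int) (attrs : List Int) :
    (pvRowA ((PySem.List.pyGet? M i).getD []) 1 attrs == 1)
      = attrs.all (fun a => pvVal M i a == 1) := by
  induction attrs with
  | nil => simp [pvRowA]
  | cons a rest ih =>
      show (pvRowA ((PySem.List.pyGet? M i).getD [])
              (pvPyAnd 1 (pvVal M i a)) rest == 1) = _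
      rw [show pvPyAnd 1 (pvVal M i a) = pvVal M i a from
        if_neg (by norm_num : (1 : Int) ≠ 0)]
      by_cases hv : pvVal M i a = 1
      · rw [hv, ih]; simp [hv]
      · rw [pvRowA_ne_one _ _ _ hv]; simp [hv]

theorem pvBLoop_eq_filter (M : List (List Int)) (attrs : List Int) :
    ∀ cand : List Int,
      pvBLoop M cand attrs = cand.filter (fun i => attrs.all (fun a => pvVal M i a == 1)) := by
  induction attrs with
  | nil => intro cand; simp [pvBLoop]
  | cons a rest ih =>
      intro cand
      simp only [pvBLoop]
      by_cases hc : cand = []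
      · simp [hc]
      · rw [if_neg hc, ih, List.filter_filter]
        simp [List.all_cons, Bool.and_comm]

-- ===== VERDICT (by name: the statement is the Claim_ definition above) =====
theorem common_objects_spec : Claim_equal_common_objects := by
  intro M attributs _hDom _hPre
  unfold Spec_common_objects common_objects common_objects_alt
  rw [pvBLoop_eq_filter]
  apply List.filter_congr
  intro e he
  obtain ⟨k, hk, rfl⟩ := List.mem_map.mp he
  have hk' := List.mem_range.mp hk
  simp only [Int.ofNat_eq_natCast]
  rw [PySem.List.pyGet?_natCast]
  rw [List.getElem?_map, List.getElem?_map, List.getElem?_range hk']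
  simpa using pvRowA_one_iff M (k : Int) attributs
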